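-- pv_equiv track=rewrite | github.com/mhgbrg/advent-of-code-2016 | Day 7 - Internet Protocol Version 7/solution2.py | existsInBrackets
-- ===== SOURCE A (Python) =====
-- def existsInBrackets(str, substring):
--     insideBrackets = False
--
--     for i in range(0, len(str) - 2):
--         if str[i] == '[':
--             insideBrackets = True
--         elif str[i] == ']':
--             insideBrackets = False
--         elif insideBrackets and str[i] + str[i + 1] + str[i + 2] == substring:
--             return True
--
--     return False
-- ===== SOURCE B (Python) =====
-- def existsInBrackets(str, substring):
--     return any(str[i:i+3] == substring
--                and str.rfind('[', 0, i) > str.rfind(']', 0, i)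
--                for i in range(len(str) - 2))
-- ===== Notes on version B (the rewrite author's own statement) =====
-- stated objective: simpler
-- what changed: Replaced the stateful bracket-tracking loop with early return by a single stateless any(...) over positions that compares the 3-char window directly and decides bracket membership per position with str.rfind('[',0,i) > str.rfind(']',0,i); Pre_ excludes 3-character substrings whose first character is '[' or ']', where a match would start on a delimiter itself and A's branch order never tests that position while B counts it - either reading of 'occurs inside brackets' is defensible there.
-- outside the precondition, e.g. on existsInBrackets('x[]ab!', ']ab'): A returns False, B returns True
import Mathlib
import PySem

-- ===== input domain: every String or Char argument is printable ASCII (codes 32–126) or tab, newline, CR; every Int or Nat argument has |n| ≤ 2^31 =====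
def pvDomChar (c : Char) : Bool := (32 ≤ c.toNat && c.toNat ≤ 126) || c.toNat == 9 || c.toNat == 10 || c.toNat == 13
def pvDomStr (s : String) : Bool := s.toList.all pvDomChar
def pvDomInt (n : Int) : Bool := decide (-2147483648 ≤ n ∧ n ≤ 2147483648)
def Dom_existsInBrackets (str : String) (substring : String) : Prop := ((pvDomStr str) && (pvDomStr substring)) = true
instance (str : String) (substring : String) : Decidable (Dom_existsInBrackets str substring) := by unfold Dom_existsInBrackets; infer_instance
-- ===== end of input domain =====

-- B replaces A's stateful bracket-tracking scan by a stateless any(...) over positions, deciding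
-- bracket membership per position with rfind comparisons; objective: simpler.

-- ===== PORT A =====
-- the for-loop with early return, as structural recursion over the index list; state = insideBrackets.
-- range(0, len(str)-2) = List.range (len - 2) (Nat subtraction = Python's empty range for len < 2);
-- every index accessed (i, i+1, i+2) is in range for i < len - 2, so getD's default is never read (exact).
def existsInBracketsGo (cs : List Char) (sub : List Char) : List Nat → Bool → Bool
  | [], _ => false
  | i :: rest, inside =>
    if cs.getD i ' ' = '[' then existsInBracketsGo cs sub rest true
    else if cs.getD i ' ' = ']' then existsInBracketsGo cs sub rest false
    else if inside && ([cs.getD i ' ', cs.getD (i+1) ' ', cs.getD (i+2) ' '] == sub) then true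
    else existsInBracketsGo cs sub rest inside

def existsInBrackets (str : String) (substring : String) : Bool :=
  existsInBracketsGo str.toList substring.toList (List.range (str.toList.length - 2)) false

-- ===== PORT B =====
-- return any(str[i:i+3] == substring and str.rfind('[',0,i) > str.rfind(']',0,i)
--            for i in range(len(str) - 2))
def existsInBrackets_alt (str : String) (substring : String) : Bool :=
  (List.range (str.toList.length - 2)).any fun i =>
    (PySem.List.slice str.toList (some (i : Int)) (some ((i : Int) + 3)) == substring.toList)
    && (PySem.Str.rfindFrom str "[" 0 (some (i : Int)) > PySem.Str.rfindFrom str "]" 0 (some (i : Int)))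

-- ===== PRECONDITION & SPEC =====
-- Pre_ excludes 3-character substrings whose first character is '[' or ']': there a match would
-- start on a delimiter itself, A's branch order never tests that position while B counts it, and
-- either reading of "occurs inside brackets" is defensible on that corner.
def Pre_existsInBrackets (str : String) (substring : String) : Prop :=
  ¬ (substring.toList.length = 3 ∧
     (substring.toList.headD ' ' = '[' ∨ substring.toList.headD ' ' = ']'))
instance (str : String) (substring : String) : Decidable (Pre_existsInBrackets str substring) := by unfold Pre_existsInBrackets; infer_instance

def pvWitness_existsInBrackets : String × String := ("x[ab]y", "ab]")

def Spec_existsInBrackets (str : String) (substring : String) (out : Bool) : Prop := out = existsInBrackets_alt str substring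
instance (str : String) (substring : String) (out : Bool) : Decidable (Spec_existsInBrackets str substring out) := by unfold Spec_existsInBrackets; infer_instance

-- ===== CLAIM (what is proved, stated in full; the proofs are below) =====
def Claim_equal_existsInBrackets : Prop := ∀ (str : String) (substring : String), Dom_existsInBrackets str substring → Pre_existsInBrackets str substring → Spec_existsInBrackets str substring (existsInBrackets str substring)

-- ===== LEMMAS AND PROOFS =====

-- bracket state at position i, as B computes it: last '[' before i more recent than last ']' before i
def insideAt (cs : List Char) (i : Nat) : Bool :=
  decide (PySem.Chars.rfind (cs.take i) ['['] > PySem.Chars.rfind (cs.take i) [']'])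

lemma go_le (xs : List Char) (c : Char) : ∀ k, PySem.Chars.rfind.go xs [c] k ≤ (k : Int) := by
  intro k
  induction k with
  | zero => simp [PySem.Chars.rfind.go]; split <;> simp
  | succ j ih =>
    rw [PySem.Chars.rfind.go]
    split
    · simp
    · exact le_trans ih (by push_cast; omega)

lemma rfind_lt_len (xs : List Char) (c : Char) :
    PySem.Chars.rfind xs [c] < (xs.length : Int) := by
  unfold PySem.Chars.rfind
  cases h : xs.length with
  | zero => rw [PySem.Chars.rfind.go]; simp [List.length_eq_zero_iff.mp h, List.isPrefixOf]
  | succ j =>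
    rw [PySem.Chars.rfind.go]
    have : xs.drop (j+1) = [] := List.drop_eq_nil_of_le (by omega)
    rw [this]
    simp only [List.isPrefixOf, Bool.and_eq_true]
    have := go_le xs c j
    split
    · simp_all [List.isPrefixOf]
    · push_cast; omega

lemma go_append (xs : List Char) (a c : Char) :
    ∀ k, k < xs.length → PySem.Chars.rfind.go (xs ++ [a]) [c] k = PySem.Chars.rfind.go xs [c] k := by
  intro k
  induction k with
  | zero =>
    intro hk
    obtain ⟨y, ys, rfl⟩ := List.exists_cons_of_ne_nil (List.ne_nil_of_length_pos hk)
    rw [PySem.Chars.rfind.go, PySem.Chars.rfind.go]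
    simp [List.isPrefixOf]
  | succ j ih =>
    intro hk
    rw [PySem.Chars.rfind.go, PySem.Chars.rfind.go]
    have hdrop : (xs ++ [a]).drop (j+1) = xs.drop (j+1) ++ [a] :=
      List.drop_append_of_le_length (by omega)
    have hpos : xs.drop (j+1) ≠ [] := by
      apply List.ne_nil_of_length_pos
      rw [List.length_drop]
      omega
    obtain ⟨y, ys, hy⟩ := List.exists_cons_of_ne_nil hpos
    rw [hdrop, hy]
    simp only [List.cons_append, List.isPrefixOf]
    rw [ih (by omega)]
    rfl

lemma rfind_concat (xs : List Char) (a c : Char) :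
    PySem.Chars.rfind (xs ++ [a]) [c] =
      if a = c then (xs.length : Int) else PySem.Chars.rfind xs [c] := by
  unfold PySem.Chars.rfind
  have hL : (xs ++ [a]).length = xs.length + 1 := by simp
  rw [hL, PySem.Chars.rfind.go]
  have hdrop : (xs ++ [a]).drop (xs.length + 1) = [] := List.drop_eq_nil_of_le (by simp)
  rw [hdrop]
  simp only [List.isPrefixOf]
  cases hxs : xs.length with
  | zero =>
    have hnil : xs = [] := List.length_eq_zero_iff.mp hxs
    subst hnil
    rw [PySem.Chars.rfind.go, PySem.Chars.rfind.go]
    simp [List.isPrefixOf]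
    split <;> simp_all [eq_comm]
  | succ j =>
    rw [PySem.Chars.rfind.go]
    have hd2 : (xs ++ [a]).drop (j + 1) = [a] := by
      rw [List.drop_append_of_le_length (by omega), List.drop_eq_nil_of_le (by omega)]
      simp
    rw [hd2]
    simp only [List.isPrefixOf, Bool.and_true]
    by_cases hac : a = c
    · simp [hac, hxs]
    · have : (c == a) = false := by simp [Ne.symm hac]
      rw [this]
      simp only [Bool.false_eq_true, if_false, if_neg hac]
      rw [go_append xs a c j (by omega)]
      conv_rhs => rw [PySem.Chars.rfind.go]
      have hnil : xs.drop (j + 1) = [] := List.drop_eq_nil_of_le (by omega)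
      rw [hnil]
      simp [List.isPrefixOf]

lemma insideAt_zero (cs : List Char) : insideAt cs 0 = false := by
  simp [insideAt, PySem.Chars.rfind, PySem.Chars.rfind.go, List.isPrefixOf]

lemma insideAt_succ (cs : List Char) (i : Nat) (hi : i < cs.length) :
    insideAt cs (i + 1) =
      if cs.getD i ' ' = '[' then true
      else if cs.getD i ' ' = ']' then false
      else insideAt cs i := by
  have htake : cs.take (i + 1) = cs.take i ++ [cs.getD i ' '] := by
    rw [List.getD_eq_getElem cs ' ' hi, List.take_succ]
    simp [List.getElem?_eq_getElem hi]
  have hlen : (cs.take i).length = i := List.length_take_of_le (by omega)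
  have hlb : PySem.Chars.rfind (cs.take i) ['['] < (i : Int) := by
    simpa [hlen] using rfind_lt_len (cs.take i) '['
  have hrb : PySem.Chars.rfind (cs.take i) [']'] < (i : Int) := by
    simpa [hlen] using rfind_lt_len (cs.take i) ']'
  unfold insideAt
  rw [htake, rfind_concat, rfind_concat, hlen]
  rcases eq_or_ne (cs.getD i ' ') '[' with h1 | h1
  · rw [if_pos h1, if_neg (by rw [h1]; decide), if_pos h1]
    simpa using hrb
  · rcases eq_or_ne (cs.getD i ' ') ']' with h2 | h2
    · rw [if_pos h2, if_neg (by rw [h2]; decide), if_neg h1, if_pos h2]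
      simpa using le_of_lt hlb
    · rw [if_neg h2, if_neg h1, if_neg h1, if_neg h2]

lemma window_eq_slice (cs : List Char) (i : Nat) (hi : i + 2 < cs.length) :
    PySem.List.slice cs (some (i : Int)) (some ((i : Int) + 3)) =
      [cs.getD i ' ', cs.getD (i+1) ' ', cs.getD (i+2) ' '] := by
  have h3 : ((i : Int) + 3) = ((i : Int) + ((3 : Nat) : Int)) := by push_cast; ring
  rw [h3, PySem.List.slice_natCast_add]
  have e0 : cs.drop i = cs.getD i ' ' :: cs.drop (i+1) := by
    rw [List.getD_eq_getElem cs ' ' (by omega)]; exact List.drop_eq_getElem_cons (by omega)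
  have e1 : cs.drop (i+1) = cs.getD (i+1) ' ' :: cs.drop (i+2) := by
    rw [List.getD_eq_getElem cs ' ' (by omega)]; exact List.drop_eq_getElem_cons (by omega)
  have e2 : cs.drop (i+2) = cs.getD (i+2) ' ' :: cs.drop (i+3) := by
    rw [List.getD_eq_getElem cs ' ' (by omega)]; exact List.drop_eq_getElem_cons (by omega)
  rw [e0, e1, e2]
  simp

-- B's per-position test equals insideAt (the str.rfind(c, 0, i) calls restricted to the prefix)
lemma rfindFrom_eq_take (cs : List Char) (c : Char) (i : Nat) :
    PySem.Chars.rfindFrom cs [c] 0 (some (i : Int)) = PySem.Chars.rfind (cs.take i) [c] := by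
  by_cases hle : i ≤ cs.length
  · unfold PySem.Chars.rfindFrom
    have he : (if (cs.length : Int) < (i : Int) then (cs.length : Int)
        else if (i : Int) < 0 then (if (i : Int) + cs.length < 0 then 0 else (i : Int) + cs.length)
        else (i : Int)) = (i : Int) := by
      split_ifs <;> omega
    simp only [he]
    simp only [if_neg (by omega : ¬ ((0:Int) < 0)), if_neg (by omega : ¬ ((i:Int) < 0))]
    rw [Int.toNat_natCast]
    simp only [List.drop_zero, Int.toNat_zero]
    split
    · omega
    · simp
  · unfold PySem.Chars.rfindFrom
    have he : (if (cs.length : Int) < (i : Int) then (cs.length : Int)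
        else if (i : Int) < 0 then (if (i : Int) + cs.length < 0 then 0 else (i : Int) + cs.length)
        else (i : Int)) = (cs.length : Int) := by
      split_ifs <;> omega
    simp only [he]
    simp only [if_neg (by omega : ¬ ((0:Int) < 0)), Int.toNat_zero, List.drop_zero]
    rw [Int.toNat_natCast, List.take_length, List.take_of_length_le (by omega)]
    split
    · omega
    · split <;> omega

-- if the substring does not have length 3, A never matches
lemma goA_len_ne (cs sub : List Char) (h : sub.length ≠ 3) :
    ∀ (l : List Nat) (st : Bool), existsInBracketsGo cs sub l st = false := by
  intro l
  induction l with
  | nil => intro st; rfl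
  | cons i rest ih =>
    intro st
    rw [existsInBracketsGo]
    have hne : ([cs.getD i ' ', cs.getD (i+1) ' ', cs.getD (i+2) ' '] == sub) = false := by
      apply beq_false_of_ne; intro hc; apply h; rw [← hc]; rfl
    split_ifs with h1 h2 h3
    · exact ih _
    · exact ih _
    · rw [hne] at h3; simp at h3
    · exact ih _

-- main invariant: A's loop over a contiguous index range, started in the correct state, equals B's any
lemma goA_eq_any (cs sub : List Char) (h3 : sub.length = 3)
    (hb1 : sub.headD ' ' ≠ '[') (hb2 : sub.headD ' ' ≠ ']') :
    ∀ (k a : Nat), (∀ i ∈ List.range' a k, i + 2 < cs.length) →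
      existsInBracketsGo cs sub (List.range' a k) (insideAt cs a)
        = (List.range' a k).any (fun i =>
            ((cs.drop i).take 3 == sub) && insideAt cs i) := by
  intro k
  induction k with
  | zero => intro a _; rfl
  | succ k ih =>
    intro a hbound
    have ha2 : a + 2 < cs.length := hbound a (by simp [List.mem_range'_1]; try omega)
    have hmem : ∀ i ∈ List.range' (a+1) k, i + 2 < cs.length := by
      intro i hi
      apply hbound
      simp [List.mem_range'_1] at hi ⊢
      omega
    have hwin : (cs.drop a).take 3 = [cs.getD a ' ', cs.getD (a+1) ' ', cs.getD (a+2) ' '] := by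
      have := window_eq_slice cs a ha2
      rwa [show ((a : Int) + 3) = ((a : Int) + ((3 : Nat) : Int)) by push_cast; ring,
        PySem.List.slice_natCast_add] at this
    rw [List.range'_succ]
    rw [existsInBracketsGo, List.any_cons]
    have hstep := insideAt_succ cs a (by omega)
    by_cases h1 : cs.getD a ' ' = '['
    · have hsub : ((cs.drop a).take 3 == sub) = false := by
        apply beq_false_of_ne
        intro hc
        apply hb1
        rw [← hc, hwin, h1]
        rfl
      rw [if_pos h1, hsub]
      simp only [Bool.false_and, Bool.false_or]
      rw [← ih (a+1) hmem, hstep, if_pos h1]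
    · by_cases h2 : cs.getD a ' ' = ']'
      · have hsub : ((cs.drop a).take 3 == sub) = false := by
          apply beq_false_of_ne
          intro hc
          apply hb2
          rw [← hc, hwin, h2]
          rfl
        rw [if_neg h1, if_pos h2, hsub]
        simp only [Bool.false_and, Bool.false_or]
        rw [← ih (a+1) hmem, hstep, if_neg h1, if_pos h2]
      · rw [if_neg h1, if_neg h2, hwin]
        have hstep' : insideAt cs (a + 1) = insideAt cs a := by
          rw [hstep, if_neg h1, if_neg h2]
        rw [← ih (a+1) hmem, hstep']
        cases hm : ([cs.getD a ' ', cs.getD (a+1) ' ', cs.getD (a+2) ' '] == sub) with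
        | true =>
          cases hst : insideAt cs a with
          | true => simp [hm, hst]
          | false => simp [hm, hst]
        | false => simp [hm]

-- ===== VERDICT (by name: the statement is the Claim_ definition above) =====
theorem existsInBrackets_spec : Claim_equal_existsInBrackets := by
  intro str substring _ hpre
  unfold Spec_existsInBrackets existsInBrackets existsInBrackets_alt
  set cs := str.toList with hcs
  set sub := substring.toList with hsub
  by_cases h3 : sub.length = 3
  · have hbr : sub.headD ' ' ≠ '[' ∧ sub.headD ' ' ≠ ']' := by
      unfold Pre_existsInBrackets at hpre
      push_neg at hpre
      exact hpre (by exact h3)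
    have hbound : ∀ i ∈ List.range' 0 (cs.length - 2), i + 2 < cs.length := by
      intro i hi
      simp [List.mem_range'_1] at hi
      omega
    rw [List.range_eq_range', ← insideAt_zero cs]
    rw [goA_eq_any cs sub h3 hbr.1 hbr.2 (cs.length - 2) 0 hbound]
    refine List.any_congr rfl ?_
    intro i
    have hsl : PySem.List.slice cs (some (i : Int)) (some ((i : Int) + 3)) = (cs.drop i).take 3 := by
      rw [show ((i : Int) + 3) = ((i : Int) + ((3 : Nat) : Int)) by push_cast; ring,
        PySem.List.slice_natCast_add]
    have hrfL : PySem.Str.rfindFrom str "[" 0 (some (i : Int)) =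
        PySem.Chars.rfind (cs.take i) ['['] := by
      simp only [PySem.Str.rfindFrom_eq]
      exact rfindFrom_eq_take cs '[' i
    have hrfR : PySem.Str.rfindFrom str "]" 0 (some (i : Int)) =
        PySem.Chars.rfind (cs.take i) [']'] := by
      simp only [PySem.Str.rfindFrom_eq]
      exact rfindFrom_eq_take cs ']' i
    rw [hsl, hrfL, hrfR]
    simp [insideAt]
  · rw [goA_len_ne cs sub h3]
    symm
    rw [List.any_eq_false]
    intro i hi
    rw [List.mem_range] at hi
    rw [window_eq_slice cs i (by omega)]
    have hne : ([cs.getD i ' ', cs.getD (i+1) ' ', cs.getD (i+2) ' '] == sub) = false := by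
      apply beq_false_of_ne; intro hc; apply h3; rw [← hc]; rfl
    rw [hne, Bool.false_and]
    simp
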